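-- pv_equiv track=rewrite | github.com/mriganv/Project-3 | app.py | skill_check
-- ===== SOURCE A (Python) =====
-- def skill_check(dict):
--     v=dict.values()
--     skill_dict={
--     'Python':0, 'R':0, 'SQL':0, 'AWS':0, 'Excel':0, 'GCP':0, 'Azure':0, 'Spark':0,
--        'PyTorch':0, 'TensorFlow':0, 'Tableau':0, 'Keras':0, 'NoSQL':0, 'Scikit-Learn':0,
--        'Machine_Learning':0, 'Hadoop':0, 'Scala':0, 'Data_Brick':0
--     }
--     for i in v:
--         if (i in skill_dict.keys()):
--             skill_dict[i]=1
--     return skill_dict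
-- ===== SOURCE B (Python) =====
-- KNOWN_SKILLS = [
--     'Python', 'R', 'SQL', 'AWS', 'Excel', 'GCP', 'Azure', 'Spark',
--     'PyTorch', 'TensorFlow', 'Tableau', 'Keras', 'NoSQL', 'Scikit-Learn',
--     'Machine_Learning', 'Hadoop', 'Scala', 'Data_Brick'
-- ]
--
-- def skill_check(dict):
--     present = set(dict.values())
--     return {name: (1 if name in present else 0) for name in KNOWN_SKILLS}
-- ===== Notes on version B (the rewrite author's own statement) =====
-- stated objective: simpler
-- what changed: Instead of initialising a zero dict and mutating flags while scanning the input values, B builds a set of the input values once and produces the result with a single comprehension over the fixed skill list, looking each skill up in the set.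
import Mathlib
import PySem

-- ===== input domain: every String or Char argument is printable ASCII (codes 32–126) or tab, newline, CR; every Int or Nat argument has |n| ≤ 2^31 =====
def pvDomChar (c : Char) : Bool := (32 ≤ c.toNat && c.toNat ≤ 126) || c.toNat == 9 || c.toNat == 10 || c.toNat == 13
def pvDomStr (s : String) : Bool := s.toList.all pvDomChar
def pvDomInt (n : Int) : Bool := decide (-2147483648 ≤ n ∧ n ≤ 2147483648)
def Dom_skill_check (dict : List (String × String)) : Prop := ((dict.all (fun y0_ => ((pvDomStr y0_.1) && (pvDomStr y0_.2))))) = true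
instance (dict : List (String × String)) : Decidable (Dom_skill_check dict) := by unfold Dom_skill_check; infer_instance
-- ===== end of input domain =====

-- B replaces A's mutate-flags-while-scanning-values loop by one set of the values plus a
-- comprehension over the fixed skill list (objective: simpler).

-- ===== PORT A =====
def skillZeroDict : PySem.Dict String Int := PySem.Dict.mk
  [("Python", 0), ("R", 0), ("SQL", 0), ("AWS", 0), ("Excel", 0), ("GCP", 0), ("Azure", 0),
   ("Spark", 0), ("PyTorch", 0), ("TensorFlow", 0), ("Tableau", 0), ("Keras", 0), ("NoSQL", 0),
   ("Scikit-Learn", 0), ("Machine_Learning", 0), ("Hadoop", 0), ("Scala", 0), ("Data_Brick", 0)]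

def skill_check (dict : List (String × String)) : List (String × Int) :=
  let v := (PySem.Dict.ofList dict).values
  let skill_dict := skillZeroDict
  (v.foldl (fun d i => if (PySem.Dict.keys d).contains i then d.insert i 1 else d) skill_dict).items

-- ===== PORT B =====
def knownSkills : List String :=
  ["Python", "R", "SQL", "AWS", "Excel", "GCP", "Azure", "Spark",
   "PyTorch", "TensorFlow", "Tableau", "Keras", "NoSQL", "Scikit-Learn",
   "Machine_Learning", "Hadoop", "Scala", "Data_Brick"]

def skill_check_alt (dict : List (String × String)) : List (String × Int) :=
  let present : PySem.Set String := PySem.Set.ofList (PySem.Dict.ofList dict).values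
  knownSkills.map (fun name => (name, if present.contains name then (1 : Int) else 0))

-- ===== PRECONDITION & SPEC =====
def Spec_skill_check (dict : List (String × String)) (out : List (String × Int)) : Prop := out = skill_check_alt dict
instance (dict : List (String × String)) (out : List (String × Int)) : Decidable (Spec_skill_check dict out) := by unfold Spec_skill_check; infer_instance

-- ===== CLAIM (what is proved, stated in full; the proofs are below) =====
def Claim_equal_skill_check : Prop := ∀ (dict : List (String × String)), Dom_skill_check dict → Spec_skill_check dict (skill_check dict)

-- ===== LEMMAS AND PROOFS =====

-- A's flag loop, in general: after folding the conditional insert over vs, each entry's value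
-- becomes 1 exactly when its key occurs in vs.
theorem foldl_flag_items (vs : List String) (d : PySem.Dict String Int) (hnd : d.keys.Nodup) :
    (vs.foldl (fun d i => if (PySem.Dict.keys d).contains i then d.insert i 1 else d) d).items
      = d.items.map (fun p => (p.1, if vs.contains p.1 then (1 : Int) else p.2)) := by
  induction vs generalizing d with
  | nil => simp
  | cons v vs ih =>
    simp only [List.foldl_cons]
    by_cases hc : (PySem.Dict.keys d).contains v = true
    · rw [if_pos hc]
      have hcd : d.contains v = true := by
        rw [PySem.Dict.contains_eq_decide_mem_keys]
        simpa using hc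
      have hnd' : (d.insert v 1).keys.Nodup := by
        rw [PySem.Dict.keys_insert_of_contains (d := d) (k := v) (v := 1) hcd]; exact hnd
      rw [ih _ hnd', PySem.Dict.items_insert_of_contains (d := d) (k := v) (v := 1) hcd, List.map_map]
      apply List.map_congr_left
      intro p _
      by_cases hpv : p.1 = v
      · simp [hpv]
      · simp [Function.comp, hpv, beq_iff_eq]
    · rw [if_neg hc]
      rw [ih _ hnd]
      apply List.map_congr_left
      intro p hp
      have hpk : p.1 ∈ d.keys := PySem.Dict.mem_keys_of_mem_items (d := d) hp
      have hpv : p.1 ≠ v := by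
        intro h
        apply hc
        rw [← h]
        simpa using hpk
      simp [hpv]

theorem skillZero_items : skillZeroDict.items = knownSkills.map (fun s => (s, (0 : Int))) := by
  decide

theorem skillZero_nodup : skillZeroDict.keys.Nodup := by decide

-- ===== VERDICT (by name: the statement is the Claim_ definition above) =====
theorem skill_check_spec : Claim_equal_skill_check := by
  intro dict _
  show skill_check dict = skill_check_alt dict
  unfold skill_check skill_check_alt
  rw [foldl_flag_items _ _ skillZero_nodup, skillZero_items, List.map_map]
  apply List.map_congr_left
  intro s _
  simp [Function.comp, PySem.Set.contains_iff, PySem.Set.mem_ofList, List.contains_iff_mem]
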